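-- pv_equiv track=rewrite | github.com/PurKot/AggieStack | aggiestack/commands/cmd_server.py | parse_command_args_for_values
-- ===== SOURCE A (Python) =====
-- def parse_command_args_for_values(command_args):
--     instance_name = None
--     flavor_name = None
--     image_name = None
--
--     number_of_args = len(command_args)
--
--     if number_of_args not in [1,3,5]:
--         raise IOError("Incorrect args")
--     instance_name = command_args[number_of_args-1]
--     i=0
--     while i<(number_of_args-2):
--         if command_args[i] not in ['--flavor', '--image']:
--             raise IOError('Incorrect args')
--         if command_args[i] == '--flavor':
--             flavor_name = command_args[i+1]
--         if command_args[i] == '--image':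
--             image_name = command_args[i+1]
--         i += 2
--
--     return instance_name, flavor_name, image_name
-- ===== SOURCE B (Python) =====
-- def _parse(args):
--     if len(args) == 1:
--         return args[0], None, None
--     flag, value, rest = args[0], args[1], args[2:]
--     if flag not in ('--flavor', '--image'):
--         raise IOError('Incorrect args')
--     inst, fl, im = _parse(rest)
--     if flag == '--flavor' and fl is None:
--         fl = value
--     if flag == '--image' and im is None:
--         im = value
--     return inst, fl, im
--
-- def parse_command_args_for_values(command_args):
--     if len(command_args) not in (1, 3, 5):
--         raise IOError("Incorrect args")
--     return _parse(command_args)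
-- ===== Notes on version B (the rewrite author's own statement) =====
-- stated objective: alternative
-- what changed: Replaces the index-stepping while loop with inline overwrite assignments by structural recursion that peels one flag/value pair, recurses on the tail, and merges back-to-front (an outer pair fills a slot only if the inner result left it empty, so later duplicates win as in A); both raise IOError on bad arity or unknown flags, which Pre_ excludes.
import Mathlib
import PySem

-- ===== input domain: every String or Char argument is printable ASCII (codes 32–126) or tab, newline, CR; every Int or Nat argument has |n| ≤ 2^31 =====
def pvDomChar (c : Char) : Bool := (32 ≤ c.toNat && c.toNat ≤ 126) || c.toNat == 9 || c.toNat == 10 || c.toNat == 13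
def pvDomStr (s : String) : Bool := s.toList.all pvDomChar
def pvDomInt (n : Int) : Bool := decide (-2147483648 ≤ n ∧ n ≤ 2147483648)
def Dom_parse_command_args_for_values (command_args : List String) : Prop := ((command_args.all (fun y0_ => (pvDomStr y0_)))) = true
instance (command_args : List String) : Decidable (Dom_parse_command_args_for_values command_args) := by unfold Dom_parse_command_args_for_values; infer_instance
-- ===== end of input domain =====

-- B replaces A's index-stepping while loop (inline overwrite assignments) by structural
-- recursion on flag/value pairs with a back-to-front merge (an outer pair fills a slot only
-- if the inner result left it empty, so later duplicates win as in A).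
-- Both Pythons raise IOError on bad arity or an unknown flag; Pre_ excludes exactly those inputs.

-- ===== PORT A =====
-- while i < n-2: check flag, assign flavor/image, i += 2.  Fuel = command_args.length bounds the loop.
def pvA_loop (cs : List String) (n : Int) : Nat → Int → Option String → Option String →
    Option (Option String × Option String)
  | fuel, i, fl, im =>
    if i < n - 2 then
      match fuel with
      | 0 => none
      | fuel + 1 =>
        match PySem.List.pyGet? cs i, PySem.List.pyGet? cs (i + 1) with
        | some k, some v =>
          if ¬(k = "--flavor" ∨ k = "--image") then none  -- raise IOError
          else
            pvA_loop cs n fuel (i + 2)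
              (if k = "--flavor" then some v else fl)
              (if k = "--image" then some v else im)
        | _, _ => none  -- IndexError
    else some (fl, im)

def parse_command_args_for_values (command_args : List String) : Option String × Option String × Option String :=
  let n : Int := command_args.length
  if ¬(n = 1 ∨ n = 3 ∨ n = 5) then (none, none, none)  -- raise IOError
  else
    match PySem.List.pyGet? command_args (n - 1) with
    | none => (none, none, none)
    | some inst =>
      match pvA_loop command_args n command_args.length 0 none none with
      | none => (none, none, none)
      | some (fl, im) => (some inst, fl, im)

-- ===== PORT B =====
-- _parse: len==1 base case; otherwise peel (flag, value), recurse on rest, merge.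
def pvB_parse : List String → Option (Option String × Option String × Option String)
  | [] => none  -- args[0] raises IndexError
  | [x] => some (some x, none, none)
  | flag :: value :: rest =>
    if ¬(flag = "--flavor" ∨ flag = "--image") then none  -- raise IOError
    else
      match pvB_parse rest with
      | none => none
      | some (inst, fl, im) =>
        some (inst,
          if flag = "--flavor" ∧ fl = none then some value else fl,
          if flag = "--image" ∧ im = none then some value else im)

def parse_command_args_for_values_alt (command_args : List String) : Option String × Option String × Option String :=
  if ¬((command_args.length : Int) = 1 ∨ (command_args.length : Int) = 3 ∨ (command_args.length : Int) = 5)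
  then (none, none, none)  -- raise IOError
  else
    match pvB_parse command_args with
    | none => (none, none, none)
    | some r => r

-- ===== PRECONDITION & SPEC =====
-- Pre_ = exactly the inputs where the Python A returns (arity 1/3/5 and known flags); elsewhere A raises IOError.
def Pre_parse_command_args_for_values (command_args : List String) : Prop :=
  command_args.length = 1 ∨
  (command_args.length = 3 ∧
    (command_args.getD 0 "" = "--flavor" ∨ command_args.getD 0 "" = "--image")) ∨
  (command_args.length = 5 ∧
    (command_args.getD 0 "" = "--flavor" ∨ command_args.getD 0 "" = "--image") ∧
    (command_args.getD 2 "" = "--flavor" ∨ command_args.getD 2 "" = "--image"))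
instance (command_args : List String) : Decidable (Pre_parse_command_args_for_values command_args) := by
  unfold Pre_parse_command_args_for_values; infer_instance

def pvWitness_parse_command_args_for_values : List String :=
  ["--flavor", "small", "--image", "ubuntu", "vm1"]

def Spec_parse_command_args_for_values (command_args : List String) (out : Option String × Option String × Option String) : Prop := out = parse_command_args_for_values_alt command_args
instance (command_args : List String) (out : Option String × Option String × Option String) : Decidable (Spec_parse_command_args_for_values command_args out) := by unfold Spec_parse_command_args_for_values; infer_instance

-- ===== CLAIM =====
def Claim_equal_parse_command_args_for_values : Prop := ∀ (command_args : List String), Dom_parse_command_args_for_values command_args → Pre_parse_command_args_for_values command_args → Spec_parse_command_args_for_values command_args (parse_command_args_for_values command_args)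

-- ===== LEMMAS AND PROOFS =====

-- ===== VERDICT =====
theorem parse_command_args_for_values_spec : Claim_equal_parse_command_args_for_values := by
  intro cs _ hpre
  unfold Spec_parse_command_args_for_values
  rcases cs with _ | ⟨a, _ | ⟨b, _ | ⟨c, _ | ⟨d, _ | ⟨e, rest⟩⟩⟩⟩⟩ <;>
    simp [Pre_parse_command_args_for_values] at hpre
  · -- [a]
    simp [parse_command_args_for_values, parse_command_args_for_values_alt, pvA_loop, pvB_parse,
      PySem.List.pyGet?, PySem.List.pyIdx?]
  · -- [a,b,c]
    rcases hpre with h | h <;> subst h <;>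
      simp [parse_command_args_for_values, parse_command_args_for_values_alt, pvA_loop, pvB_parse,
        PySem.List.pyGet?, PySem.List.pyIdx?]
  · -- a::b::c::d::e::rest, length must be 5 so rest = []
    obtain ⟨hlen, h0, h2⟩ := hpre
    have hrest : rest = [] := by
      cases rest with
      | nil => rfl
      | cons x xs => simp at hlen
    subst hrest
    rcases h0 with h0 | h0 <;> rcases h2 with h2 | h2 <;> subst h0 <;> subst h2 <;>
      simp [parse_command_args_for_values, parse_command_args_for_values_alt, pvA_loop, pvB_parse,
        PySem.List.pyGet?, PySem.List.pyIdx?]
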